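-- pv_equiv track=rewrite | github.com/TalayKD/costmap-uncertainty | cost_analyze/test_tartanvo/test_tartanvo.py | extract_good_seqs
-- ===== SOURCE A (Python) =====
-- def extract_good_seqs(bad_mask):
--     seqs = []
--     startind, endind = 0, 0 # split the traj into good sequences
--     k = 0
--     while k < len(bad_mask):
--         if not bad_mask[k]:
--             startind = k
--             while k < len(bad_mask) and not bad_mask[k]:
--                 k += 1
--             endind = k
--             seqs.append([startind, endind])
--         k += 1
--     return seqs
-- ===== SOURCE B (Python) =====
-- def extract_good_seqs(bad_mask):
--     # pass 1: run-length encode the mask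
--     runs = []
--     for x in bad_mask:
--         b = bool(x)
--         if runs and runs[-1][0] == b:
--             runs[-1][1] += 1
--         else:
--             runs.append([b, 1])
--     # pass 2: emit [start, end) intervals for the good (falsy) runs
--     seqs = []
--     idx = 0
--     for b, n in runs:
--         if not b:
--             seqs.append([idx, idx + n])
--         idx += n
--     return seqs
-- ===== Notes on version B (the rewrite author's own statement) =====
-- stated objective: alternative
-- what changed: Replaces the nested-while index scanning with a run-length-encoding pass followed by a pass that emits an interval per falsy run.
import Mathlib
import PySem

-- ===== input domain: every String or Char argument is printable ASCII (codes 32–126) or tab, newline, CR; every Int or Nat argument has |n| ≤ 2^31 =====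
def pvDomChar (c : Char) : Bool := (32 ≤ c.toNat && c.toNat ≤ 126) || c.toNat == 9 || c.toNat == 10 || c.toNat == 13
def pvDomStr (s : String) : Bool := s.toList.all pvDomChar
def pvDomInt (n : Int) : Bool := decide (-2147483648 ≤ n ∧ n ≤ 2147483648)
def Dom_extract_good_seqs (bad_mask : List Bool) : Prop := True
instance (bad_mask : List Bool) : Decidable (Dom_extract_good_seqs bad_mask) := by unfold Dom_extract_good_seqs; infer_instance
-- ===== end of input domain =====

-- B replaces A's nested-while index scanning with a run-length-encoding pass plus an
-- interval-emitting pass (objective: alternative; same O(n) cost).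

-- ===== PORT A =====
-- inner while: advance k while k < len(bad_mask) and not bad_mask[k]
def pvScanA (bad : List Bool) (k : Nat) : Nat :=
  if h : k < bad.length then
    if bad[k] then k else pvScanA bad (k+1)
  else k
termination_by bad.length - k

theorem pvScanA_ge (bad : List Bool) (k : Nat) : k ≤ pvScanA bad k := by
  unfold pvScanA
  split
  · split
    · exact le_refl k
    · exact le_trans (Nat.le_succ k) (pvScanA_ge bad (k+1))
  · exact le_refl k
termination_by bad.length - k

-- outer while over k, accumulating seqs (returned suffix form)
def pvGoA (bad : List Bool) (k : Nat) : List (List Int) :=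
  if h : k < bad.length then
    if bad[k] then pvGoA bad (k+1)
    else
      [[(k : Int), (pvScanA bad k : Int)]] ++ pvGoA bad (pvScanA bad k + 1)
  else []
termination_by bad.length - k
decreasing_by
  · omega
  · have := pvScanA_ge bad k; omega

def extract_good_seqs (bad_mask : List Bool) : List (List Int) :=
  pvGoA bad_mask 0

-- ===== PORT B =====
-- pass 1 of Source B: runs kept newest-first (Python mutates runs[-1]; here that run is the head)
def pvStep (acc : List (Bool × Nat)) (x : Bool) : List (Bool × Nat) :=
  match acc with
  | (b, n) :: rest => if b == x then (b, n+1) :: rest else (x, 1) :: (b, n) :: rest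
  | [] => [(x, 1)]

-- pass 2 of Source B: for (b, n) in runs, appending to seqs and advancing idx
def pvEmitLoop (runs : List (Bool × Nat)) (idx : Nat) (seqs : List (List Int)) : List (List Int) :=
  match runs with
  | [] => seqs
  | (b, n) :: rest =>
      pvEmitLoop rest (idx + n) (if b then seqs else seqs ++ [[(idx : Int), ((idx + n : Nat) : Int)]])

def extract_good_seqs_alt (bad_mask : List Bool) : List (List Int) :=
  pvEmitLoop ((bad_mask.foldl pvStep []).reverse) 0 []

-- ===== PRECONDITION & SPEC =====
def Spec_extract_good_seqs (bad_mask : List Bool) (out : List (List Int)) : Prop := out = extract_good_seqs_alt bad_mask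
instance (bad_mask : List Bool) (out : List (List Int)) : Decidable (Spec_extract_good_seqs bad_mask out) := by unfold Spec_extract_good_seqs; infer_instance

-- ===== CLAIM (what is proved, stated in full; the proofs are below) =====
def Claim_equal_extract_good_seqs : Prop := ∀ (bad_mask : List Bool), Dom_extract_good_seqs bad_mask → Spec_extract_good_seqs bad_mask (extract_good_seqs bad_mask)

-- ===== LEMMAS AND PROOFS =====

-- leading-false count
def pvLF : List Bool → Nat
  | [] => 0
  | true :: _ => 0
  | false :: xs => 1 + pvLF xs

-- structural version of A's outer loop, over the suffix starting at position i
def pvFA : List Bool → Nat → List (List Int)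
  | [], _ => []
  | true :: xs, i => pvFA xs (i+1)
  | false :: xs, i =>
      [[(i : Int), ((i + 1 + pvLF xs : Nat) : Int)]] ++ pvFA (xs.drop (pvLF xs + 1)) (i + 2 + pvLF xs)
termination_by xs _ => xs.length
decreasing_by
  · simp
  · simp

-- tail-recursive run-length spec
def pvRle (b : Bool) (n : Nat) : List Bool → List (Bool × Nat)
  | [] => [(b, n)]
  | y :: ys => if b == y then pvRle b (n+1) ys else (b, n) :: pvRle y 1 ys

-- structural version of B's pass 2
def pvEmit : List (Bool × Nat) → Nat → List (List Int)
  | [], _ => []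
  | (b, n) :: rest, i =>
      if b then pvEmit rest (i + n)
      else [[(i : Int), ((i + n : Nat) : Int)]] ++ pvEmit rest (i + n)

theorem pvFA_nil (i : Nat) : pvFA [] i = [] := by unfold pvFA; rfl

theorem pvEmitLoop_eq (runs : List (Bool × Nat)) :
    ∀ i s, pvEmitLoop runs i s = s ++ pvEmit runs i := by
  induction runs with
  | nil => intro i s; simp [pvEmitLoop, pvEmit]
  | cons p rest ih =>
      intro i s
      obtain ⟨b, n⟩ := p
      cases b <;> simp [pvEmitLoop, pvEmit, ih]

theorem pvFold_rle (xs : List Bool) :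
    ∀ b n rest, (List.foldl pvStep ((b, n) :: rest) xs).reverse = rest.reverse ++ pvRle b n xs := by
  induction xs with
  | nil => intro b n rest; simp [pvRle]
  | cons x ys ih =>
      intro b n rest
      by_cases h : b = x
      · subst h; simp [pvStep, pvRle, ih]
      · have hb : (b == x) = false := by simp [h]
        simp [pvStep, pvRle, hb, ih]

-- the element right after the leading-false run is true (if it exists)
theorem pvLF_drop (xs : List Bool) :
    ∀ j, pvFA (xs.drop (pvLF xs)) j = pvFA (xs.drop (pvLF xs + 1)) (j + 1) := by
  induction xs with
  | nil => intro j; simp [pvFA, pvLF]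
  | cons x ys ih =>
      intro j
      cases x with
      | true => simp [pvLF, pvFA]
      | false =>
          have : pvLF (false :: ys) = 1 + pvLF ys := rfl
          simp only [this]
          have h1 : (false :: ys).drop (1 + pvLF ys) = ys.drop (pvLF ys) := by
            simp [Nat.add_comm 1 (pvLF ys), List.drop_succ_cons]
          have h2 : (false :: ys).drop (1 + pvLF ys + 1) = ys.drop (pvLF ys + 1) := by
            simp [Nat.add_comm 1 (pvLF ys), List.drop_succ_cons]
          rw [h1, h2, ih]

-- joint characterisation of emit ∘ rle
theorem pvEmit_rle (xs : List Bool) :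
    ∀ n i, (pvEmit (pvRle true n xs) i = pvFA xs (i + n)) ∧
           (pvEmit (pvRle false n xs) i =
             [[(i : Int), ((i + n + pvLF xs : Nat) : Int)]] ++ pvFA (xs.drop (pvLF xs)) (i + n + pvLF xs)) := by
  induction xs with
  | nil => intro n i; simp [pvRle, pvEmit, pvFA, pvLF]
  | cons x ys ih =>
      intro n i
      constructor
      · cases x with
        | true =>
            have := (ih (n+1) i).1
            simp only [pvRle, pvFA, beq_self_eq_true, if_true] at this ⊢
            rw [this]; ring_nf
        | false =>
            show pvEmit ((true, n) :: pvRle false 1 ys) i = pvFA (false :: ys) (i + n)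
            have := (ih 1 (i + n)).2
            simp only [pvEmit, if_true, pvFA]
            rw [this, pvLF_drop]
            rw [show i + n + 1 + pvLF ys + 1 = i + n + 2 + pvLF ys from by omega]
      · cases x with
        | true =>
            show pvEmit ((false, n) :: pvRle true 1 ys) i =
              [[(i : Int), ((i + n + pvLF (true :: ys) : Nat) : Int)]] ++
                pvFA ((true :: ys).drop (pvLF (true :: ys))) (i + n + pvLF (true :: ys))
            have := (ih 1 (i + n)).1
            simp only [pvEmit, pvLF, List.drop_zero, if_false, Bool.false_eq_true, pvFA]
            rw [this]
            simp
        | false =>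
            show pvEmit (pvRle false (n+1) ys) i =
              [[(i : Int), ((i + n + pvLF (false :: ys) : Nat) : Int)]] ++
                pvFA ((false :: ys).drop (pvLF (false :: ys))) (i + n + pvLF (false :: ys))
            have h0 : pvLF (false :: ys) = 1 + pvLF ys := rfl
            have h1 : (false :: ys).drop (1 + pvLF ys) = ys.drop (pvLF ys) := by
              rw [Nat.add_comm 1 (pvLF ys)]; simp [List.drop_succ_cons]
            rw [(ih (n+1) i).2, h0, h1,
              show i + n + (1 + pvLF ys) = i + (n+1) + pvLF ys from by omega]

-- A-side: scan computes position + leading-false count of the suffix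
theorem pvScanA_eq (bad : List Bool) (k : Nat) :
    pvScanA bad k = k + pvLF (bad.drop k) := by
  unfold pvScanA
  split
  · rename_i h
    have hget : bad.drop k = bad[k] :: bad.drop (k+1) := by
      rw [List.drop_eq_getElem_cons h]
    split
    · rename_i ht
      rw [hget, ht]; simp [pvLF]
    · rename_i hf
      have hb : bad[k] = false := by revert hf; cases bad[k] <;> simp
      rw [pvScanA_eq bad (k+1), hget, hb]
      simp [pvLF]; omega
  · rename_i h
    have : bad.drop k = [] := List.drop_eq_nil_of_le (by omega)
    rw [this]; simp [pvLF]
termination_by bad.length - k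

theorem pvGoA_eq (bad : List Bool) (k : Nat) :
    pvGoA bad k = pvFA (bad.drop k) k := by
  unfold pvGoA
  split
  · rename_i h
    have hget : bad.drop k = bad[k] :: bad.drop (k+1) := by
      rw [List.drop_eq_getElem_cons h]
    split
    · rename_i ht
      rw [pvGoA_eq bad (k+1), hget, ht]; simp [pvFA]
    · rename_i hf
      have hb : bad[k] = false := by revert hf; cases bad[k] <;> simp
      rw [hget, hb]
      rw [pvGoA_eq bad (pvScanA bad k + 1)]
      rw [pvScanA_eq bad k, hget, hb]
      simp only [pvLF, pvFA]
      have hd : bad.drop (k + (1 + pvLF (bad.drop (k+1))) + 1) =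
          (bad.drop (k+1)).drop (pvLF (bad.drop (k+1)) + 1) := by
        rw [List.drop_drop]; congr 1; omega
      rw [hd,
        show k + (1 + pvLF (bad.drop (k+1))) = k + 1 + pvLF (bad.drop (k+1)) from by omega,
        show k + 1 + pvLF (bad.drop (k+1)) + 1 = k + 2 + pvLF (bad.drop (k+1)) from by omega]
  · rename_i h
    have : bad.drop k = [] := List.drop_eq_nil_of_le (by omega)
    rw [this, pvFA_nil]
termination_by bad.length - k
decreasing_by
  all_goals (have := pvScanA_ge bad k; omega)

-- ===== VERDICT (by name: the statement is the Claim_ definition above) =====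
theorem extract_good_seqs_spec : Claim_equal_extract_good_seqs := by
  intro bad _
  unfold Spec_extract_good_seqs extract_good_seqs extract_good_seqs_alt
  rw [pvGoA_eq]
  cases bad with
  | nil => simp [pvFA, pvEmitLoop]
  | cons x xs =>
      have hfold : (List.foldl pvStep [] (x :: xs)).reverse = pvRle x 1 xs := by
        have := pvFold_rle xs x 1 []
        simpa [pvStep] using this
      rw [hfold, pvEmitLoop_eq]
      cases x with
      | true => simpa [pvFA] using ((pvEmit_rle xs 1 0).1).symm
      | false =>
          have h2 := (pvEmit_rle xs 1 0).2
          rw [h2, pvLF_drop]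
          simp [pvFA]
          rw [show 1 + pvLF xs + 1 = 2 + pvLF xs from by omega]
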